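-- pv_equiv track=rewrite | github.com/wangyendt/LeetCode | Contests/200-300/week 278/2157. Groups of Strings/Groups of Strings.py | groupStrings
-- ===== SOURCE A (Python) =====
-- from collections import  defaultdict
--
-- def groupStrings(w):
--     M = {sum(1 << (ord(i) - ord("a")) for i in word): j for j, word in enumerate(w)}
--
--     G = defaultdict(list)
--     masks = defaultdict(list)
--     for idx, word in enumerate(w):
--         vals = [ord(i) - ord("a") for i in word]
--         mask = sum(1 << i for i in vals)
--         for i in vals:
--             masks[mask - (1 << i) + (1 << 26)].append(idx)
--             if mask - (1 << i) not in M: continue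
--             idx2 = M[mask - (1 << i)]
--             G[idx] += [idx2]
--             G[idx2] += [idx]
--
--     for x in masks.values():
--         for a, b in zip(x, x[1:]):
--             G[a] += [b]
--             G[b] += [a]
--
--     V, comps, r = set(), 0, 0
--     for u in range(len(w)):
--         if u in V: continue
--         compsize, q = 1, [u]
--         V.add(u)
--         while q:
--             u = q.pop()
--             for v in G[u]:
--                 if v in V: continue
--                 compsize += 1
--                 V.add(v)
--                 q += [v]
--         r = max(r, compsize)
--         comps += 1
--     return [comps, r]
-- ===== SOURCE B (Python) =====
-- from collections import defaultdict
--
-- def groupStrings(w):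
--     n = len(w)
--     wmasks = [sum(1 << (ord(c) - 97) for c in word) for word in w]
--     M = {m: j for j, m in enumerate(wmasks)}
--
--     edges = []
--     buckets = defaultdict(list)
--     for idx, (word, mask) in enumerate(zip(w, wmasks)):
--         for c in word:
--             i = ord(c) - 97
--             buckets[mask - (1 << i) + (1 << 26)].append(idx)
--             d = mask - (1 << i)
--             if d in M:
--                 edges.append((idx, M[d]))
--     for xs in buckets.values():
--         for a, b in zip(xs, xs[1:]):
--             edges.append((a, b))
--
--     label = list(range(n))
--     for a, b in edges:
--         la, lb = label[a], label[b]
--         if la != lb: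
--             label = [la if x == lb else x for x in label]
--
--     sizes = defaultdict(int)
--     for l in label:
--         sizes[l] += 1
--     r = 0
--     for s in sizes.values():
--         r = max(r, s)
--     return [len(sizes), r]
-- ===== Notes on version B (the rewrite author's own statement) =====
-- stated objective: alternative
-- what changed: The adjacency-list dict and the stack-based BFS sweep are replaced by a flat edge list consumed by label propagation (each edge merges two label classes via a full relabelling pass, a simpler but worst-case-slower mechanism), with component count and largest size read off a counter of the final labels.
-- outside the precondition, e.g. on groupStrings([' ']): A raises ValueError, B raises ValueError
import Mathlib
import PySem

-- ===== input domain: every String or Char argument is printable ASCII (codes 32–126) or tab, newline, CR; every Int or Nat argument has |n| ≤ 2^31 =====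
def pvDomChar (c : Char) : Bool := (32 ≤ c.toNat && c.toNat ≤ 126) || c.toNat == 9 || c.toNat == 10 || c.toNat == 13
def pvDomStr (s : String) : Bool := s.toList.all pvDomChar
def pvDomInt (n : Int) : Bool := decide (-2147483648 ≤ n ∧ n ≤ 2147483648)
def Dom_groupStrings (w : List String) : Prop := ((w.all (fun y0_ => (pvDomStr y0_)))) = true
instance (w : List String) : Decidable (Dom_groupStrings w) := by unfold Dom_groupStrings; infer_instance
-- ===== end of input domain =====

-- B replaces A's adjacency-dict + stack-based BFS sweep by a flat edge list, label
-- propagation (each edge merges two label classes by a relabelling pass, worst-case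
-- slower than the BFS on large inputs) and a counter aggregation (objective: alternative).

-- ===== PORT A =====
-- Under Pre_ every character code is ≥ 97, so Python's `ord(i) - ord("a")` is the
-- Nat subtraction `c.toNat - 97` and `1 << (ord(i) - ord("a"))` is `(1 : Int) <<< (c.toNat - 97)` (exact there).

-- vals = [ord(i) - ord("a") for i in word]
def pvValsOf (word : String) : List Nat :=
  word.toList.map (fun c => c.toNat - 97)

-- `G[a] += [b]; G[b] += [a]` on the defaultdict G (second line reads the dict updated by the first)
def pvAddEdge (G : PySem.Dict Int (List Int)) (a b : Int) : PySem.Dict Int (List Int) :=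
  let G1 := G.insert a (G.getD a [] ++ [b])
  G1.insert b (G1.getD b [] ++ [a])

-- M = {sum(1 << (ord(i) - ord("a")) for i in word): j for j, word in enumerate(w)}
def pvM (w : List String) : PySem.Dict Int Int :=
  (PySem.List.enumerate w).foldl
    (fun d p => d.insert ((p.2.toList.map (fun c => (1 : Int) <<< (c.toNat - 97 : Nat))).sum) p.1)
    PySem.Dict.empty

-- body of the first `for idx, word in enumerate(w)` loop, one step per element i of vals
def pvStep1A (M : PySem.Dict Int Int) (idx : Int) (mask : Int)
    (st : PySem.Dict Int (List Int) × PySem.Dict Int (List Int)) (i : Nat) :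
    PySem.Dict Int (List Int) × PySem.Dict Int (List Int) :=
  let masks' := st.2.modify (mask - ((1 : Int) <<< i) + ((1 : Int) <<< 26)) [] (· ++ [idx])
  match M.get? (mask - ((1 : Int) <<< i)) with
  | none => (st.1, masks')
  | some idx2 => (pvAddEdge st.1 idx idx2, masks')

def pvLoop1A (M : PySem.Dict Int Int) (w : List String) :
    PySem.Dict Int (List Int) × PySem.Dict Int (List Int) :=
  (PySem.List.enumerate w).foldl
    (fun st p =>
      (pvValsOf p.2).foldl
        (pvStep1A M p.1 (((pvValsOf p.2).map (fun (i : Nat) => (1 : Int) <<< i)).sum)) st)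
    (PySem.Dict.empty, PySem.Dict.empty)

-- for x in masks.values(): for a, b in zip(x, x[1:]): G[a] += [b]; G[b] += [a]
def pvLoop2A (G0 : PySem.Dict Int (List Int)) (masksv : List (List Int)) :
    PySem.Dict Int (List Int) :=
  masksv.foldl (fun G x => (x.zip (x.drop 1)).foldl (fun G ab => pvAddEdge G ab.1 ab.2) G) G0

-- the `while q:` BFS loop; fuel only makes the recursion structural, it is never
-- exhausted on the inputs the claim covers (proved below)
def pvBfs (G : PySem.Dict Int (List Int)) :
    Nat → PySem.Set Int → List Int → Int → (PySem.Set Int × Int)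
  | 0, V, _, c => (V, c)
  | (fuel+1), V, q, c =>
    if q.isEmpty then (V, c)
    else
      let u := q.getLast!
      let st := (G.getD u []).foldl
        (fun (st : PySem.Set Int × List Int × Int) v =>
          if PySem.Set.contains st.1 v then st
          else (PySem.Set.add st.1 v, st.2.1 ++ [v], st.2.2 + 1))
        (V, q.dropLast, c)
      pvBfs G fuel st.1 st.2.1 st.2.2

def groupStrings (w : List String) : List Int :=
  let M := pvM w
  let st1 := pvLoop1A M w
  let G := pvLoop2A st1.1 st1.2.values
  let fuel := G.values.flatten.length + 2
  let fin := (PySem.List.pyRange 0 (w.length : Int) 1).foldl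
    (fun (st : PySem.Set Int × Int × Int) u =>
      if PySem.Set.contains st.1 u then st
      else
        let r1 := pvBfs G fuel (PySem.Set.add st.1 u) [u] 1
        (r1.1, st.2.1 + 1, max st.2.2 r1.2))
    (PySem.Set.empty, 0, 0)
  [fin.2.1, fin.2.2]

-- ===== PORT B =====
-- wmasks = [sum(1 << (ord(c) - 97) for c in word) for word in w]
def pvWmasksB (w : List String) : List Int :=
  w.map (fun word => (word.toList.map (fun c => (1 : Int) <<< (c.toNat - 97 : Nat))).sum)

-- M = {m: j for j, m in enumerate(wmasks)}
def pvMB (wmasks : List Int) : PySem.Dict Int Int :=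
  (PySem.List.enumerate wmasks).foldl (fun d p => d.insert p.2 p.1) PySem.Dict.empty

-- the edge-collecting loop: for idx, (word, mask) in enumerate(zip(w, wmasks)): for c in word: …
def pvLoop1B (M : PySem.Dict Int Int) (w : List String) (wmasks : List Int) :
    List (Int × Int) × PySem.Dict Int (List Int) :=
  (PySem.List.enumerate (w.zip wmasks)).foldl
    (fun st p =>
      p.2.1.toList.foldl
        (fun (st : List (Int × Int) × PySem.Dict Int (List Int)) c =>
          let i : Nat := c.toNat - 97
          let buckets' := st.2.modify (p.2.2 - ((1 : Int) <<< i) + ((1 : Int) <<< 26)) [] (· ++ [p.1])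
          match M.get? (p.2.2 - ((1 : Int) <<< i)) with
          | none => (st.1, buckets')
          | some j => (st.1 ++ [(p.1, j)], buckets'))
        st)
    ([], PySem.Dict.empty)

def groupStrings_alt (w : List String) : List Int :=
  let n := w.length
  let wmasks := pvWmasksB w
  let M := pvMB wmasks
  let st := pvLoop1B M w wmasks
  -- for xs in buckets.values(): for a, b in zip(xs, xs[1:]): edges.append((a, b))
  let edges := st.2.values.foldl
    (fun es xs => (xs.zip (xs.drop 1)).foldl (fun es ab => es ++ [ab]) es) st.1
  -- label = list(range(n)); per edge merge the two label classes
  let label := edges.foldl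
    (fun (lab : List Int) ab =>
      let la := (PySem.List.pyGet? lab ab.1).getD 0   -- indices are < n: Python never raises here
      let lb := (PySem.List.pyGet? lab ab.2).getD 0
      if la ≠ lb then lab.map (fun x => if x = lb then la else x) else lab)
    (PySem.List.pyRange 0 (n : Int) 1)
  -- sizes = defaultdict(int); for l in label: sizes[l] += 1
  let sizes := label.foldl (fun d l => d.modify l 0 (· + 1)) PySem.Dict.empty
  let r := sizes.values.foldl (fun r s => max r s) 0
  [(sizes.size : Int), r]

-- ===== PRECONDITION & SPEC =====
-- Pre_ excludes exactly the inputs where A raises: a character with code < 97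
-- ('a') makes `1 << (ord(i) - ord("a"))` a shift by a negative amount, a ValueError.
def Pre_groupStrings (w : List String) : Prop :=
  (w.all (fun word => word.toList.all (fun c => decide (97 ≤ c.toNat)))) = true

instance (w : List String) : Decidable (Pre_groupStrings w) := by
  unfold Pre_groupStrings; infer_instance

def pvWitness_groupStrings : List String := ["ab", "b", "cd"]

def Spec_groupStrings (w : List String) (out : List Int) : Prop := out = groupStrings_alt w
instance (w : List String) (out : List Int) : Decidable (Spec_groupStrings w out) := by
  unfold Spec_groupStrings; infer_instance

-- ===== CLAIM (what is proved, stated in full; the proofs are below) =====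
def Claim_equal_groupStrings : Prop :=
  ∀ (w : List String), Dom_groupStrings w → Pre_groupStrings w →
    Spec_groupStrings w (groupStrings w)

-- ===== LEMMAS AND PROOFS =====

-- ---------- proof-side abbreviations ----------

def pvMaskOf (word : String) : Int :=
  (word.toList.map (fun c => (1 : Int) <<< (c.toNat - 97 : Nat))).sum

def pvDelPairs (M : PySem.Dict Int Int) (w : List String) : List (Int × Int) :=
  (PySem.List.enumerate w).flatMap
    (fun p => (pvValsOf p.2).filterMap
      (fun (i : Nat) => (M.get? (pvMaskOf p.2 - ((1 : Int) <<< i))).map (fun j => (p.1, j))))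

def pvBucketEvents (w : List String) : List (Int × Int) :=
  (PySem.List.enumerate w).flatMap
    (fun p => (pvValsOf p.2).map (fun (i : Nat) => (pvMaskOf p.2 - ((1 : Int) <<< i) + ((1 : Int) <<< 26), p.1)))

def pvBuckets (w : List String) : PySem.Dict Int (List Int) :=
  (pvBucketEvents w).foldl (fun d e => d.modify e.1 [] (· ++ [e.2])) PySem.Dict.empty

def pvChainPairs (w : List String) : List (Int × Int) :=
  (pvBuckets w).values.flatMap (fun xs => xs.zip (xs.drop 1))

def pvE (w : List String) : List (Int × Int) := pvDelPairs (pvM w) w ++ pvChainPairs w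

def pvAdj (G : PySem.Dict Int (List Int)) (u v : Int) : Prop := v ∈ G.getD u []

def pvConn (w : List String) (u v : Int) : Prop :=
  Relation.EqvGen (fun a b => (a, b) ∈ pvE w) u v

def pvGood (n : Nat) (v : Int) : Prop := 0 ≤ v ∧ v < (n : Int)

def pvLabGet (lab : List Int) (v : Int) : Int := (PySem.List.pyGet? lab v).getD 0

def pvLabStep (lab : List Int) (ab : Int × Int) : List Int :=
  let la := pvLabGet lab ab.1
  let lb := pvLabGet lab ab.2
  if la ≠ lb then lab.map (fun x => if x = lb then la else x) else lab

def pvLabF (w : List String) : List Int :=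
  (pvE w).foldl pvLabStep (PySem.List.pyRange 0 (w.length : Int) 1)

-- ---------- generic list facts ----------

theorem pvGetLastConcat (l : List Int) (x : Int) : (l ++ [x]).getLast! = x := by
  cases l with
  | nil => rfl
  | cons a t =>
    show (a :: (t ++ [x])).getLast _ = x
    exact List.getLast_concat (l := a :: t)

theorem pvLenFilterNot (p : Int → Bool) (l : List Int) :
    (List.filter p l).length + (List.filter (fun x => !p x) l).length = l.length := by
  induction l with
  | nil => rfl
  | cons a t ih => by_cases h : p a <;> simp [List.filter, h] <;> omega

theorem pvFoldlFlatMap {α β γ : Type} (l : List α) (g : α → List β) (f : γ → β → γ) (init : γ) :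
    (l.flatMap g).foldl f init = l.foldl (fun acc x => (g x).foldl f acc) init := by
  induction l generalizing init with
  | nil => rfl
  | cons a t ih => simp [List.flatMap_cons, List.foldl_append, ih]

theorem pvFilterNodupPerm (l₁ l₂ : List Int) (h₁ : l₁.Nodup) (h₂ : l₂.Nodup)
    (h : ∀ x, x ∈ l₁ ↔ x ∈ l₂) : l₁.length = l₂.length :=
  List.Perm.length_eq ((List.perm_ext_iff_of_nodup h₁ h₂).2 h)

-- ---------- enumerate ----------

theorem pvEnumerateBound {α : Type} (l : List α) (i : Int) :
    ∀ p ∈ PySem.List.enumerate l i, i ≤ p.1 ∧ p.1 < i + l.length := by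
  induction l generalizing i with
  | nil => simp [PySem.List.enumerate]
  | cons a t ih =>
    intro p hp
    rw [show PySem.List.enumerate (a :: t) i = (i, a) :: PySem.List.enumerate t (i + 1) from rfl] at hp
    rcases List.mem_cons.1 hp with rfl | hp
    · constructor <;> simp
    · have := ih (i + 1) p hp
      simp only [List.length_cons]
      push_cast
      omega

theorem pvEnumerateMap {α β : Type} (l : List α) (f : α → β) (i : Int) :
    PySem.List.enumerate (l.map f) i = (PySem.List.enumerate l i).map (fun p => (p.1, f p.2)) := by
  induction l generalizing i with
  | nil => rfl
  | cons a t ih => simp [PySem.List.enumerate, ih]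

-- ---------- M ----------

theorem pvM_eq_pvMB (w : List String) : pvM w = pvMB (pvWmasksB w) := by
  unfold pvM pvMB pvWmasksB
  rw [pvEnumerateMap, List.foldl_map]

theorem pvFoldlInsertGet {α : Type} (l : List α) (k : α → Int) (v : α → Int) :
    ∀ (d : PySem.Dict Int Int) (x j : Int),
      (l.foldl (fun d a => d.insert (k a) (v a)) d).get? x = some j →
      d.get? x = some j ∨ ∃ a ∈ l, j = v a := by
  induction l with
  | nil => intro d x j h; exact Or.inl h
  | cons a t ih =>
    intro d x j h
    rcases ih _ x j h with h' | ⟨b, hb, rfl⟩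
    · by_cases hx : x = k a
      · subst hx; rw [PySem.Dict.get?_insert_self] at h'
        exact Or.inr ⟨a, by simp, (Option.some_inj.1 h').symm⟩
      · rw [PySem.Dict.get?_insert_of_ne _ _ hx] at h'
        exact Or.inl h'
    · exact Or.inr ⟨b, by simp [hb], rfl⟩

theorem pvM_get_good (w : List String) (m j : Int) :
    (pvM w).get? m = some j → pvGood w.length j := by
  intro h
  unfold pvM at h
  rcases pvFoldlInsertGet _ _ _ _ _ _ h with h' | ⟨a, ha, rfl⟩
  · simp [PySem.Dict.get?_empty] at h'
  · have := pvEnumerateBound w 0 a ha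
    exact ⟨by omega, by omega⟩

-- ---------- adjacency building ----------

theorem pvAdj_addEdge (G : PySem.Dict Int (List Int)) (a b u v : Int) :
    pvAdj (pvAddEdge G a b) u v ↔ pvAdj G u v ∨ (u = a ∧ v = b) ∨ (u = b ∧ v = a) := by
  unfold pvAdj pvAddEdge
  simp only [PySem.Dict.getD_insert]
  split_ifs <;> simp_all [List.mem_append]

theorem pvAdj_foldAdd (ps : List (Int × Int)) :
    ∀ (G : PySem.Dict Int (List Int)) (u v : Int),
      pvAdj (ps.foldl (fun G ab => pvAddEdge G ab.1 ab.2) G) u v ↔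
        pvAdj G u v ∨ (u, v) ∈ ps ∨ (v, u) ∈ ps := by
  induction ps with
  | nil => simp
  | cons ab t ih =>
    intro G u v
    rw [List.foldl_cons, ih, pvAdj_addEdge]
    simp only [List.mem_cons, Prod.ext_iff]
    tauto


-- ---------- loop 1 / loop 2 characterizations ----------

theorem pvMaskOfEq (word : String) :
    ((pvValsOf word).map (fun (i : Nat) => (1 : Int) <<< i)).sum = pvMaskOf word := by
  unfold pvValsOf pvMaskOf
  rw [List.map_map]
  rfl

theorem pvLoop1AInner (M : PySem.Dict Int Int) (idx mask : Int) (vals : List Nat) :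
    ∀ st : PySem.Dict Int (List Int) × PySem.Dict Int (List Int),
      vals.foldl (pvStep1A M idx mask) st
        = ((vals.filterMap (fun (i : Nat) => (M.get? (mask - ((1 : Int) <<< i))).map (fun j => (idx, j)))).foldl
              (fun G ab => pvAddEdge G ab.1 ab.2) st.1,
           (vals.map (fun (i : Nat) => (mask - ((1 : Int) <<< i) + ((1 : Int) <<< 26), idx))).foldl
              (fun d e => d.modify e.1 [] (· ++ [e.2])) st.2) := by
  induction vals with
  | nil => intro st; simp
  | cons i t ih =>
    intro st
    rw [List.foldl_cons, ih, List.filterMap_cons, List.map_cons]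
    unfold pvStep1A
    cases M.get? (mask - ((1 : Int) <<< i)) <;> simp

theorem pvLoop1ASplit (M : PySem.Dict Int Int) (l : List (Int × String)) :
    ∀ st : PySem.Dict Int (List Int) × PySem.Dict Int (List Int),
      l.foldl
        (fun st p =>
          (pvValsOf p.2).foldl
            (pvStep1A M p.1 (((pvValsOf p.2).map (fun (i : Nat) => (1 : Int) <<< i)).sum)) st)
        st
        = ((l.flatMap (fun p => (pvValsOf p.2).filterMap
              (fun (i : Nat) => (M.get? (pvMaskOf p.2 - ((1 : Int) <<< i))).map (fun j => (p.1, j))))).foldl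
              (fun G ab => pvAddEdge G ab.1 ab.2) st.1,
           (l.flatMap (fun p => (pvValsOf p.2).map
              (fun (i : Nat) => (pvMaskOf p.2 - ((1 : Int) <<< i) + ((1 : Int) <<< 26), p.1)))).foldl
              (fun d e => d.modify e.1 [] (· ++ [e.2])) st.2) := by
  induction l with
  | nil => intro st; simp
  | cons p t ih =>
    intro st
    simp only [List.foldl_cons, List.flatMap_cons, List.foldl_append]
    rw [pvMaskOfEq, pvLoop1AInner, ih]

theorem pvLoop1A_eq (M : PySem.Dict Int Int) (w : List String) :
    pvLoop1A M w
      = ((pvDelPairs M w).foldl (fun G ab => pvAddEdge G ab.1 ab.2) PySem.Dict.empty,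
         pvBuckets w) := by
  unfold pvLoop1A pvDelPairs pvBuckets pvBucketEvents
  exact pvLoop1ASplit M (PySem.List.enumerate w) (PySem.Dict.empty, PySem.Dict.empty)

theorem pvLoop1BInner (M : PySem.Dict Int Int) (idx mask : Int) (cs : List Char) :
    ∀ st : List (Int × Int) × PySem.Dict Int (List Int),
      cs.foldl
        (fun (st : List (Int × Int) × PySem.Dict Int (List Int)) c =>
          let i : Nat := c.toNat - 97
          let buckets' := st.2.modify (mask - ((1 : Int) <<< i) + ((1 : Int) <<< 26)) [] (· ++ [idx])
          match M.get? (mask - ((1 : Int) <<< i)) with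
          | none => (st.1, buckets')
          | some j => (st.1 ++ [(idx, j)], buckets')) st
      = (st.1 ++ (cs.map (fun c => c.toNat - 97)).filterMap
            (fun (i : Nat) => (M.get? (mask - ((1 : Int) <<< i))).map (fun j => (idx, j))),
         ((cs.map (fun c => c.toNat - 97)).map
            (fun (i : Nat) => (mask - ((1 : Int) <<< i) + ((1 : Int) <<< 26), idx))).foldl
            (fun d e => d.modify e.1 [] (· ++ [e.2])) st.2) := by
  induction cs with
  | nil => intro st; simp
  | cons c t ih =>
    intro st
    rw [List.foldl_cons, ih, List.map_cons, List.filterMap_cons, List.map_cons]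
    split <;> rename_i h
    · rw [Option.map_eq_none_iff] at h
      simp [h]
    · rcases Option.map_eq_some_iff.1 h with ⟨j, hj, rfl⟩
      simp [hj, List.append_assoc]

theorem pvLoop1BSplit (M : PySem.Dict Int Int) :
    ∀ (ws : List String) (k : Int) (st : List (Int × Int) × PySem.Dict Int (List Int)),
      (PySem.List.enumerate (ws.zip (ws.map pvMaskOf)) k).foldl
        (fun st p =>
          p.2.1.toList.foldl
            (fun (st : List (Int × Int) × PySem.Dict Int (List Int)) c =>
              let i : Nat := c.toNat - 97
              let buckets' := st.2.modify (p.2.2 - ((1 : Int) <<< i) + ((1 : Int) <<< 26)) [] (· ++ [p.1])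
              match M.get? (p.2.2 - ((1 : Int) <<< i)) with
              | none => (st.1, buckets')
              | some j => (st.1 ++ [(p.1, j)], buckets'))
            st)
        st
      = (st.1 ++ (PySem.List.enumerate ws k).flatMap
            (fun p => (pvValsOf p.2).filterMap
              (fun (i : Nat) => (M.get? (pvMaskOf p.2 - ((1 : Int) <<< i))).map (fun j => (p.1, j)))),
         ((PySem.List.enumerate ws k).flatMap
            (fun p => (pvValsOf p.2).map
              (fun (i : Nat) => (pvMaskOf p.2 - ((1 : Int) <<< i) + ((1 : Int) <<< 26), p.1)))).foldl
            (fun d e => d.modify e.1 [] (· ++ [e.2])) st.2) := by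
  intro ws
  induction ws with
  | nil => intro k st; simp [PySem.List.enumerate]
  | cons a t ih =>
    intro k st
    rw [show (a :: t).zip ((a :: t).map pvMaskOf) = (a, pvMaskOf a) :: t.zip (t.map pvMaskOf) from rfl]
    rw [show PySem.List.enumerate ((a, pvMaskOf a) :: t.zip (t.map pvMaskOf)) k
          = (k, (a, pvMaskOf a)) :: PySem.List.enumerate (t.zip (t.map pvMaskOf)) (k + 1) from rfl]
    rw [show PySem.List.enumerate (a :: t) k = (k, a) :: PySem.List.enumerate t (k + 1) from rfl]
    simp only [List.foldl_cons, List.flatMap_cons, List.foldl_append]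
    rw [pvLoop1BInner, ih]
    unfold pvValsOf
    simp [List.append_assoc]

theorem pvLoop1B_eq (w : List String) :
    pvLoop1B (pvM w) w (pvWmasksB w) = (pvDelPairs (pvM w) w, pvBuckets w) := by
  unfold pvLoop1B pvDelPairs pvBuckets pvBucketEvents
  rw [show pvWmasksB w = w.map pvMaskOf from rfl]
  exact pvLoop1BSplit (pvM w) w 0 ([], PySem.Dict.empty)

theorem pvFoldAppendPairs (vals : List (List Int)) :
    ∀ es : List (Int × Int),
      vals.foldl (fun es xs => (xs.zip (xs.drop 1)).foldl (fun es ab => es ++ [ab]) es) es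
        = es ++ vals.flatMap (fun xs => xs.zip (xs.drop 1)) := by
  induction vals with
  | nil => intro es; simp
  | cons xs t ih =>
    intro es
    rw [List.foldl_cons, PySem.List.foldl_append_singleton_eq_self, ih]
    simp [List.flatMap_cons]

theorem pvLoop2A_eq (G0 : PySem.Dict Int (List Int)) (vals : List (List Int)) :
    pvLoop2A G0 vals
      = (vals.flatMap (fun xs => xs.zip (xs.drop 1))).foldl
          (fun G ab => pvAddEdge G ab.1 ab.2) G0 := by
  unfold pvLoop2A
  rw [pvFoldlFlatMap]

-- the adjacency of A's finished graph is exactly symmetric membership in the edge list pvE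
theorem pvAdjGfin (w : List String) (u v : Int) :
    pvAdj (pvLoop2A (pvLoop1A (pvM w) w).1 (pvLoop1A (pvM w) w).2.values) u v
      ↔ (u, v) ∈ pvE w ∨ (v, u) ∈ pvE w := by
  rw [pvLoop1A_eq, pvLoop2A_eq]
  show pvAdj _ u v ↔ _
  rw [pvAdj_foldAdd, pvAdj_foldAdd]
  unfold pvE pvChainPairs pvAdj
  simp only [PySem.Dict.getD_empty, List.not_mem_nil, List.mem_append]
  constructor
  · rintro ((h | h | h) | h | h) <;> tauto
  · rintro (h | h) <;> tauto

-- ---------- bounds: every endpoint in pvE is an index in [0, n) ----------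

theorem pvBucketsElemGood (w : List String) :
    ∀ xs ∈ (pvBuckets w).values, ∀ x ∈ xs, pvGood w.length x := by
  intro xs hxs x hx
  have hnd : (pvBuckets w).keys.Nodup := by
    unfold pvBuckets
    exact PySem.Dict.nodup_keys_foldl_modify_key _ _ _ _ _ (by simp [PySem.Dict.keys_empty])
  rw [PySem.Dict.values_eq_map_keys _ hnd []] at hxs
  rcases List.mem_map.1 hxs with ⟨k, _, rfl⟩
  unfold pvBuckets at hx
  rw [PySem.Dict.getD_foldl_modify_append, PySem.Dict.getD_empty] at hx
  simp only [List.nil_append, List.mem_map, List.mem_filter] at hx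
  rcases hx with ⟨e, ⟨he, _⟩, rfl⟩
  unfold pvBucketEvents at he
  rcases List.mem_flatMap.1 he with ⟨p, hp, hep⟩
  rcases List.mem_map.1 hep with ⟨i, _, rfl⟩
  have := pvEnumerateBound w 0 p hp
  exact ⟨by omega, by omega⟩

theorem pvEGood (w : List String) :
    ∀ p ∈ pvE w, pvGood w.length p.1 ∧ pvGood w.length p.2 := by
  intro p hp
  unfold pvE at hp
  rcases List.mem_append.1 hp with h | h
  · unfold pvDelPairs at h
    rcases List.mem_flatMap.1 h with ⟨q, hq, hpq⟩
    rcases List.mem_filterMap.1 hpq with ⟨i, _, hi⟩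
    rcases Option.map_eq_some_iff.1 hi with ⟨j, hj, rfl⟩
    have hb := pvEnumerateBound w 0 q hq
    exact ⟨⟨by omega, by omega⟩, pvM_get_good w _ j hj⟩
  · unfold pvChainPairs at h
    rcases List.mem_flatMap.1 h with ⟨xs, hxs, hpz⟩
    have := List.of_mem_zip (by exact_mod_cast hpz)
    rcases this with ⟨h1, h2⟩
    exact ⟨pvBucketsElemGood w xs hxs p.1 h1,
           pvBucketsElemGood w xs hxs p.2 (List.mem_of_mem_drop h2)⟩


-- ---------- connectivity, labels ----------

theorem pvEqvToEq {S : List (Int × Int)} {P : Int → Prop} {f : Int → Int}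
    (h : ∀ p ∈ S, P p.1 ∧ P p.2 ∧ f p.1 = f p.2) {i j : Int}
    (hc : Relation.EqvGen (fun a b => (a, b) ∈ S) i j) :
    i = j ∨ (P i ∧ P j ∧ f i = f j) := by
  induction hc with
  | rel a b hab => exact Or.inr (h (a, b) hab)
  | refl a => exact Or.inl rfl
  | symm a b _ ih => rcases ih with rfl | ⟨h1, h2, h3⟩ <;> [exact Or.inl rfl; exact Or.inr ⟨h2, h1, h3.symm⟩]
  | trans a b c _ _ ih1 ih2 =>
    rcases ih1 with rfl | ⟨h1, h2, h3⟩
    · exact ih2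
    · rcases ih2 with rfl | ⟨h4, h5, h6⟩
      · exact Or.inr ⟨h1, h2, h3⟩
      · exact Or.inr ⟨h1, h5, h3.trans h6⟩

theorem pvLabGetInRange (lab : List Int) (v : Int) (h0 : 0 ≤ v) (h1 : v < lab.length) :
    pvLabGet lab v = lab[v.toNat]'(by omega) := by
  unfold pvLabGet
  lift v to Nat using h0
  rw [PySem.List.pyGet?_natCast]
  rw [List.getElem?_eq_getElem (by exact_mod_cast h1)]
  rfl

theorem pvLabGetMap (lab : List Int) (σ : Int → Int) (v : Int) (h0 : 0 ≤ v) (h1 : v < lab.length) :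
    pvLabGet (lab.map σ) v = σ (pvLabGet lab v) := by
  rw [pvLabGetInRange _ _ h0 (by simpa using h1), pvLabGetInRange _ _ h0 h1]
  simp

-- kernel invariant for one label-propagation step
theorem pvLabStepKer (n : Nat) (S : List (Int × Int)) (lab : List Int) (a b : Int)
    (hlen : lab.length = n)
    (hS : ∀ p ∈ S, pvGood n p.1 ∧ pvGood n p.2)
    (ha : pvGood n a) (hb : pvGood n b)
    (hker : ∀ i j : Int, pvGood n i → pvGood n j →
      (pvLabGet lab i = pvLabGet lab j ↔ Relation.EqvGen (fun x y => (x, y) ∈ S) i j)) :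
    (pvLabStep lab (a, b)).length = n ∧
    ∀ i j : Int, pvGood n i → pvGood n j →
      (pvLabGet (pvLabStep lab (a, b)) i = pvLabGet (pvLabStep lab (a, b)) j ↔
        Relation.EqvGen (fun x y => (x, y) ∈ S ++ [(a, b)]) i j) := by
  have hga : 0 ≤ a ∧ a < (lab.length : Int) := by unfold pvGood at ha; omega
  have hgb : 0 ≤ b ∧ b < (lab.length : Int) := by unfold pvGood at hb; omega
  unfold pvLabStep
  simp only []
  by_cases hne : pvLabGet lab a = pvLabGet lab b
  · -- labels already equal: nothing changes
    rw [if_neg (by simp [hne])]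
    refine ⟨hlen, ?_⟩
    intro i j hi hj
    rw [hker i j hi hj]
    constructor
    · intro h
      exact Relation.EqvGen.mono (fun x y hxy => by simp [hxy]) h
    · intro h
      have hall : ∀ p ∈ S ++ [(a, b)], pvGood n p.1 ∧ pvGood n p.2 ∧ pvLabGet lab p.1 = pvLabGet lab p.2 := by
        intro p hp
        rcases List.mem_append.1 hp with hp | hp
        · obtain ⟨h1, h2⟩ := hS p hp
          exact ⟨h1, h2, (hker p.1 p.2 h1 h2).2 (Relation.EqvGen.rel _ _ hp)⟩
        · simp only [List.mem_singleton] at hp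
          subst hp
          exact ⟨ha, hb, hne⟩
      rcases pvEqvToEq (P := pvGood n) (f := pvLabGet lab) hall h with rfl | ⟨_, _, hf⟩
      · exact Relation.EqvGen.refl i
      · exact (hker i j hi hj).1 hf
  · -- merge the class of lb into la
    rw [if_pos (by simpa using hne)]
    refine ⟨by simpa using hlen, ?_⟩
    intro i j hi hj
    have hgi : 0 ≤ i ∧ i < (lab.length : Int) := by unfold pvGood at hi; omega
    have hgj : 0 ≤ j ∧ j < (lab.length : Int) := by unfold pvGood at hj; omega
    rw [pvLabGetMap _ _ _ hgi.1 hgi.2, pvLabGetMap _ _ _ hgj.1 hgj.2]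
    constructor
    · intro h
      have hcase : i = j ∨
          (pvLabGet lab i = pvLabGet lab j) ∨
          (pvLabGet lab i = pvLabGet lab b ∧ pvLabGet lab j = pvLabGet lab a) ∨
          (pvLabGet lab i = pvLabGet lab a ∧ pvLabGet lab j = pvLabGet lab b) := by
        by_cases c1 : pvLabGet lab i = pvLabGet lab b <;>
          by_cases c2 : pvLabGet lab j = pvLabGet lab b
        · rw [if_pos c1, if_pos c2] at h; exact Or.inr (Or.inl (c1.trans c2.symm))
        · rw [if_pos c1, if_neg c2] at h; exact Or.inr (Or.inr (Or.inl ⟨c1, h.symm⟩))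
        · rw [if_neg c1, if_pos c2] at h; exact Or.inr (Or.inr (Or.inr ⟨h, c2⟩))
        · rw [if_neg c1, if_neg c2] at h; exact Or.inr (Or.inl h)
      have base : ∀ u v : Int, pvGood n u → pvGood n v → pvLabGet lab u = pvLabGet lab v →
          Relation.EqvGen (fun x y => (x, y) ∈ S ++ [(a, b)]) u v := by
        intro u v hu hv huv
        exact Relation.EqvGen.mono (fun x y hxy => by simp [hxy])
          ((hker u v hu hv).1 huv)
      have eab : Relation.EqvGen (fun x y => (x, y) ∈ S ++ [(a, b)]) a b :=
        Relation.EqvGen.rel _ _ (by simp)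
      rcases hcase with rfl | heq | ⟨h1, h2⟩ | ⟨h1, h2⟩
      · exact Relation.EqvGen.refl i
      · exact base i j hi hj heq
      · exact (base i b hi hb h1).trans _ _ _
          ((Relation.EqvGen.symm _ _ eab).trans _ _ _ (base a j ha hj h2.symm))
      · exact (base i a hi ha h1).trans _ _ _
          (eab.trans _ _ _ (base b j hb hj h2.symm))
    · intro h
      have hall : ∀ p ∈ S ++ [(a, b)], pvGood n p.1 ∧ pvGood n p.2 ∧
          (fun x => if x = pvLabGet lab b then pvLabGet lab a else x) (pvLabGet lab p.1)
            = (fun x => if x = pvLabGet lab b then pvLabGet lab a else x) (pvLabGet lab p.2) := by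
        intro p hp
        rcases List.mem_append.1 hp with hp | hp
        · obtain ⟨h1, h2⟩ := hS p hp
          exact ⟨h1, h2, by rw [(hker p.1 p.2 h1 h2).2 (Relation.EqvGen.rel _ _ hp)]⟩
        · simp only [List.mem_singleton] at hp
          subst hp
          exact ⟨ha, hb, by simp [hne]⟩
      rcases pvEqvToEq (P := pvGood n)
          (f := fun x => (fun y => if y = pvLabGet lab b then pvLabGet lab a else y) (pvLabGet lab x))
          hall h with rfl | ⟨_, _, hf⟩
      · rfl
      · exact hf


theorem pvLabFoldKer (n : Nat) :
    ∀ (es : List (Int × Int)) (S : List (Int × Int)) (lab : List Int),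
      lab.length = n →
      (∀ p ∈ S, pvGood n p.1 ∧ pvGood n p.2) →
      (∀ p ∈ es, pvGood n p.1 ∧ pvGood n p.2) →
      (∀ i j : Int, pvGood n i → pvGood n j →
        (pvLabGet lab i = pvLabGet lab j ↔ Relation.EqvGen (fun x y => (x, y) ∈ S) i j)) →
      (es.foldl pvLabStep lab).length = n ∧
      ∀ i j : Int, pvGood n i → pvGood n j →
        (pvLabGet (es.foldl pvLabStep lab) i = pvLabGet (es.foldl pvLabStep lab) j ↔
          Relation.EqvGen (fun x y => (x, y) ∈ S ++ es) i j) := by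
  intro es
  induction es with
  | nil => intro S lab hlen hS _ hker; exact ⟨hlen, by simpa using hker⟩
  | cons e t ih =>
    intro S lab hlen hS hes hker
    obtain ⟨he, ht⟩ := List.forall_mem_cons.1 hes
    have step := pvLabStepKer n S lab e.1 e.2 hlen hS he.1 he.2 hker
    have hrec := ih (S ++ [e]) (pvLabStep lab e)
      (by simpa using step.1)
      (by intro p hp
          rcases List.mem_append.1 hp with hp | hp
          · exact hS p hp
          · simp only [List.mem_singleton] at hp; subst hp; exact he)
      ht
      (by simpa using step.2)
    rw [List.foldl_cons]
    constructor
    · exact hrec.1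
    · intro i j hi hj
      rw [hrec.2 i j hi hj]
      constructor <;> refine fun h => Relation.EqvGen.mono (fun x y hxy => ?_) h <;>
        simp at hxy ⊢ <;> tauto

-- the initial labels: label = list(range(n))
theorem pvLabInit (n : Nat) :
    (PySem.List.pyRange 0 (n : Int) 1).length = n ∧
    ∀ i : Int, pvGood n i → pvLabGet (PySem.List.pyRange 0 (n : Int) 1) i = i := by
  have he : PySem.List.pyRange 0 (n : Int) 1 = (List.range n).map (fun (k : Nat) => (k : Int)) :=
    PySem.List.pyRange_zero_natCast n
  constructor
  · simp [he]
  · intro i hi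
    obtain ⟨h0, h1⟩ := hi
    rw [he, pvLabGetInRange _ _ h0 (by simpa using h1)]
    simp only [List.getElem_map, List.getElem_range]
    omega

theorem pvLabFKer (w : List String) :
    (pvLabF w).length = w.length ∧
    ∀ i j : Int, pvGood w.length i → pvGood w.length j →
      (pvLabGet (pvLabF w) i = pvLabGet (pvLabF w) j ↔ pvConn w i j) := by
  have init := pvLabInit w.length
  have h := pvLabFoldKer w.length (pvE w) [] (PySem.List.pyRange 0 (w.length : Int) 1)
    init.1 (by simp) (pvEGood w)
    (by
      intro i j hi hj
      rw [init.2 i hi, init.2 j hj]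
      constructor
      · rintro rfl; exact Relation.EqvGen.refl i
      · intro h
        rcases pvEqvToEq (P := fun _ => True) (f := fun x => x) (by simp) h with rfl | ⟨_, _, hf⟩
        · rfl
        · exact hf)
  exact ⟨h.1, by simpa using h.2⟩

-- ---------- reachability along A's adjacency = pvConn ----------

theorem pvConnGood (w : List String) (u v : Int) (h : pvConn w u v) :
    u = v ∨ (pvGood w.length u ∧ pvGood w.length v) := by
  rcases pvEqvToEq (P := pvGood w.length) (f := fun _ => 0)
    (by intro p hp; obtain ⟨h1, h2⟩ := pvEGood w p hp; exact ⟨h1, h2, rfl⟩) h with rfl | ⟨h1, h2, _⟩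
  · exact Or.inl rfl
  · exact Or.inr ⟨h1, h2⟩

theorem pvRtIffConn (w : List String) (G : PySem.Dict Int (List Int))
    (hG : ∀ u v, pvAdj G u v ↔ (u, v) ∈ pvE w ∨ (v, u) ∈ pvE w) (u v : Int) :
    Relation.ReflTransGen (pvAdj G) u v ↔ pvConn w u v := by
  constructor
  · intro h
    induction h with
    | refl => exact Relation.EqvGen.refl u
    | tail _ hadj ih =>
      rename_i x y _
      rcases (hG x y).1 hadj with he | he
      · exact ih.trans _ _ _ (Relation.EqvGen.rel _ _ he)
      · exact ih.trans _ _ _ (Relation.EqvGen.symm _ _ (Relation.EqvGen.rel _ _ he))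
  · intro h
    have hsym : Symmetric (pvAdj G) := by
      intro x y hxy
      rcases (hG x y).1 hxy with he | he
      · exact (hG y x).2 (Or.inr he)
      · exact (hG y x).2 (Or.inl he)
    induction h with
    | rel x y hxy => exact Relation.ReflTransGen.single ((hG x y).2 (Or.inl hxy))
    | refl => exact Relation.ReflTransGen.refl
    | symm x y _ ih => exact Relation.ReflTransGen.symmetric hsym ih
    | trans x y z _ _ ih1 ih2 => exact ih1.trans ih2

theorem pvClosedRt {G : PySem.Dict Int (List Int)} {X : List Int}
    (hcl : ∀ x ∈ X, ∀ y, pvAdj G x y → y ∈ X) {a b : Int}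
    (ha : a ∈ X) (h : Relation.ReflTransGen (pvAdj G) a b) : b ∈ X := by
  induction h with
  | refl => exact ha
  | tail _ hadj ih => exact hcl _ ih _ hadj

-- ---------- the BFS loop ----------

def pvMiss (G : PySem.Dict Int (List Int)) (V : PySem.Set Int) : Nat :=
  ((PySem.Set.ofList G.values.flatten).filter (fun x => !(PySem.Set.contains V x))).length

theorem pvFilterDropLen (U V p : List Int) (hU : U.Nodup) (hpnd : p.Nodup)
    (hdisj : ∀ x ∈ p, x ∉ V) (hpU : ∀ x ∈ p, x ∈ U) :
    (U.filter (fun x => !((V ++ p).contains x))).length + p.length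
      = (U.filter (fun x => !(V.contains x))).length := by
  have e1 : U.filter (fun x => !((V ++ p).contains x))
      = (U.filter (fun x => !(V.contains x))).filter (fun x => !(p.contains x)) := by
    rw [List.filter_filter]
    apply List.filter_congr
    intro x _
    rw [List.contains_append]
    cases hv : V.contains x <;> cases hp : p.contains x <;> rfl
  have e2 : ((U.filter (fun x => !(V.contains x))).filter (fun x => p.contains x)).length
      = p.length := by
    apply pvFilterNodupPerm
    · exact (hU.filter _).filter _
    · exact hpnd
    · intro x
      constructor
      · intro hx
        have := List.of_mem_filter hx
        simpa [List.contains_eq_mem] using this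
      · intro hx
        apply List.mem_filter.2
        refine ⟨List.mem_filter.2 ⟨hpU x hx, ?_⟩, ?_⟩
        · simp [List.contains_eq_mem, hdisj x hx]
        · simp [List.contains_eq_mem, hx]
  have e3 := pvLenFilterNot (fun x => p.contains x) (U.filter (fun x => !(V.contains x)))
  rw [e1]
  omega

theorem pvBfsInner (adj : List Int) :
    ∀ (V : PySem.Set Int) (q : List Int) (c : Int), V.Nodup →
      ∃ p : List Int,
        adj.foldl
          (fun (st : PySem.Set Int × List Int × Int) v =>
            if PySem.Set.contains st.1 v then st
            else (PySem.Set.add st.1 v, st.2.1 ++ [v], st.2.2 + 1)) (V, q, c)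
          = (V ++ p, q ++ p, c + p.length) ∧
        p.Nodup ∧ (∀ x ∈ p, x ∈ adj ∧ x ∉ V) ∧ (∀ x ∈ adj, x ∈ V ∨ x ∈ p) := by
  induction adj with
  | nil => intro V q c _; exact ⟨[], by simp, by simp, by simp, by simp⟩
  | cons v t ih =>
    intro V q c hnd
    by_cases hv : v ∈ V
    · rw [List.foldl_cons, if_pos (by simpa [PySem.Set.contains_iff] using hv)]
      obtain ⟨p, h1, h2, h3, h4⟩ := ih V q c hnd
      refine ⟨p, h1, h2, ?_, ?_⟩
      · exact fun x hx => ⟨List.mem_cons_of_mem _ (h3 x hx).1, (h3 x hx).2⟩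
      · intro x hx
        rcases List.mem_cons.1 hx with rfl | hx
        · exact Or.inl hv
        · exact h4 x hx
    · rw [List.foldl_cons, if_neg (by simpa [PySem.Set.contains_iff] using hv)]
      have hstep : (PySem.Set.add V v, q ++ [v], c + 1) = ((V ++ [v] : List Int), q ++ [v], c + 1) := by
        rw [PySem.Set.add_of_not_mem hv]
      rw [hstep]
      have hnd' : (V ++ [v]).Nodup := by
        rw [List.nodup_append]
        exact ⟨hnd, List.nodup_singleton v, by intro a ha b hb; simp at hb; subst hb; exact fun h => hv (h ▸ ha)⟩
      obtain ⟨p, h1, h2, h3, h4⟩ := ih (V ++ [v]) (q ++ [v]) (c + 1) hnd'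
      refine ⟨v :: p, ?_, ?_, ?_, ?_⟩
      · rw [h1]
        refine Prod.ext (by simp) (Prod.ext (by simp) ?_)
        simp only [List.length_cons]
        push_cast
        omega
      · exact List.nodup_cons.2 ⟨fun hc => (h3 v hc).2 (by simp), h2⟩
      · intro x hx
        rcases List.mem_cons.1 hx with rfl | hx
        · exact ⟨by simp, hv⟩
        · obtain ⟨hx1, hx2⟩ := h3 x hx
          exact ⟨List.mem_cons_of_mem _ hx1, fun hc => hx2 (List.mem_append_left _ hc)⟩
      · intro x hx
        rcases List.mem_cons.1 hx with rfl | hx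
        · exact Or.inr (by simp)
        · rcases h4 x hx with hV | hp
          · rcases List.mem_append.1 hV with hV | hV
            · exact Or.inl hV
            · exact Or.inr (by simpa using Or.inl (by simpa using hV))
          · exact Or.inr (List.mem_cons_of_mem _ hp)

theorem pvAdjSubFlatten (G : PySem.Dict Int (List Int)) (u x : Int)
    (hx : x ∈ G.getD u []) : x ∈ PySem.Set.ofList G.values.flatten := by
  rw [PySem.Set.mem_ofList, List.mem_flatten]
  rcases h : G.get? u with _ | l
  · rw [PySem.Dict.getD_of_get?_eq_none G [] h] at hx
    simp at hx
  · rw [PySem.Dict.getD_of_get?_eq_some G [] h] at hx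
    refine ⟨l, ?_, hx⟩
    have := PySem.Dict.mem_items_of_get?_eq_some G h
    unfold PySem.Dict.values
    exact List.mem_map.2 ⟨(u, l), this, rfl⟩

theorem pvBfsSpec (G : PySem.Dict Int (List Int)) :
    ∀ (fuel : Nat) (V : PySem.Set Int) (q : List Int) (c : Int),
      V.Nodup → (∀ x ∈ q, x ∈ V) →
      (∀ x ∈ V, x ∉ q → ∀ y, pvAdj G x y → y ∈ V) →
      q.length + pvMiss G V ≤ fuel →
      (pvBfs G fuel V q c).1.Nodup ∧
      (∀ x ∈ V, x ∈ (pvBfs G fuel V q c).1) ∧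
      (∀ x ∈ (pvBfs G fuel V q c).1, x ∈ V ∨ ∃ z ∈ q, Relation.ReflTransGen (pvAdj G) z x) ∧
      (∀ x ∈ (pvBfs G fuel V q c).1, ∀ y, pvAdj G x y → y ∈ (pvBfs G fuel V q c).1) ∧
      (pvBfs G fuel V q c).2 = c + ((pvBfs G fuel V q c).1.length : Int) - ((V.length : Int)) := by
  intro fuel
  induction fuel with
  | zero =>
    intro V q c hnd hqV hcl hfuel
    have hq : q = [] := List.eq_nil_of_length_eq_zero (by omega)
    subst hq
    exact ⟨hnd, fun x hx => hx, fun x hx => Or.inl hx,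
      fun x hx y hy => hcl x hx (by simp) y hy, by simp [pvBfs]⟩
  | succ fuel ih =>
    intro V q c hnd hqV hcl hfuel
    rcases List.eq_nil_or_concat q with rfl | ⟨q₁, u, rfl⟩
    · exact ⟨hnd, fun x hx => hx, fun x hx => Or.inl hx,
        fun x hx y hy => hcl x hx (by simp) y hy, by simp [pvBfs]⟩
    · have hq : ¬ (q₁ ++ [u]).isEmpty := by simp [List.concat_eq_append] at *
      have huV : u ∈ V := hqV u (by simp [List.concat_eq_append])
      obtain ⟨p, h1, h2, h3, h4⟩ := pvBfsInner (G.getD u []) V q₁ c hnd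
      have hbfs : pvBfs G (fuel + 1) V (q₁ ++ [u]) c
          = pvBfs G fuel (V ++ p) (q₁ ++ p) (c + p.length) := by
        show (if (q₁ ++ [u]).isEmpty then (V, c)
          else pvBfs G fuel _ _ _) = _
        rw [if_neg hq]
        rw [show (q₁ ++ [u]).getLast! = u from pvGetLastConcat q₁ u,
            show (q₁ ++ [u]).dropLast = q₁ from List.dropLast_concat, h1]
      rw [List.concat_eq_append] at *
      rw [hbfs]
      have hndp : (V ++ p).Nodup := by
        rw [List.nodup_append]
        refine ⟨hnd, h2, ?_⟩
        exact fun a ha b hb h => (h3 b hb).2 (h ▸ ha)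
      have hq' : ∀ x ∈ q₁ ++ p, x ∈ V ++ p := by
        intro x hx
        rcases List.mem_append.1 hx with hx | hx
        · exact List.mem_append_left _ (hqV x (List.mem_append_left _ hx))
        · exact List.mem_append_right _ hx
      have hcl' : ∀ x ∈ V ++ p, x ∉ q₁ ++ p → ∀ y, pvAdj G x y → y ∈ V ++ p := by
        intro x hx hxq y hy
        rcases List.mem_append.1 hx with hx | hx
        · by_cases hxu : x = u
          · subst hxu
            rcases h4 y hy with h | h
            · exact List.mem_append_left _ h
            · exact List.mem_append_right _ h
          · have hxq1 : x ∉ q₁ := fun hc => hxq (List.mem_append_left _ hc)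
            have : x ∉ q₁ ++ [u] := by
              intro hc
              rcases List.mem_append.1 hc with hc | hc
              · exact hxq1 hc
              · exact hxu (by simpa using hc)
            exact List.mem_append_left _ (hcl x hx this y hy)
        · exact absurd (List.mem_append_right _ hx) hxq
      have hfuel' : (q₁ ++ p).length + pvMiss G (V ++ p) ≤ fuel := by
        have hdrop : pvMiss G (V ++ p) + p.length = pvMiss G V :=
          pvFilterDropLen _ V p (PySem.Set.nodup_ofList _) h2
            (fun x hx => (h3 x hx).2)
            (fun x hx => pvAdjSubFlatten G u x (h3 x hx).1)
        simp only [List.length_append, List.length_singleton] at hfuel ⊢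
        omega
      obtain ⟨c1, c2, c3, c4, c5⟩ := ih (V ++ p) (q₁ ++ p) (c + p.length) hndp hq' hcl' hfuel'
      refine ⟨c1, ?_, ?_, c4, ?_⟩
      · exact fun x hx => c2 x (List.mem_append_left _ hx)
      · intro x hx
        rcases c3 x hx with h | ⟨z, hz, hrt⟩
        · rcases List.mem_append.1 h with h | h
          · exact Or.inl h
          · exact Or.inr ⟨u, by simp, Relation.ReflTransGen.single ((h3 x h).1)⟩
        · rcases List.mem_append.1 hz with hz | hz
          · exact Or.inr ⟨z, List.mem_append_left _ hz, hrt⟩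
          · refine Or.inr ⟨u, by simp, ?_⟩
            exact (Relation.ReflTransGen.single ((h3 z hz).1 : pvAdj G u z)).trans hrt
      · rw [c5]
        have : (V ++ p).length = V.length + p.length := by simp
        rw [this]
        push_cast
        ring

-- ---------- the main sweep ----------

theorem pvMissLe (G : PySem.Dict Int (List Int)) (V : PySem.Set Int) :
    pvMiss G V ≤ G.values.flatten.length :=
  le_trans (List.length_filter_le _ _) (PySem.Set.length_ofList_le _)

def pvSweepState (G : PySem.Dict Int (List Int)) (fuel : Nat) (u : Nat) :
    PySem.Set Int × Int × Int :=
  ((List.range u).map (fun (k : Nat) => (k : Int))).foldl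
    (fun (st : PySem.Set Int × Int × Int) x =>
      if PySem.Set.contains st.1 x then st
      else
        let r1 := pvBfs G fuel (PySem.Set.add st.1 x) [x] 1
        (r1.1, st.2.1 + 1, max st.2.2 r1.2))
    (PySem.Set.empty, 0, 0)

theorem pvLabAsMap (w : List String) :
    pvLabF w = (List.range w.length).map (fun (k : Nat) => pvLabGet (pvLabF w) (k : Int)) := by
  have hlen := (pvLabFKer w).1
  apply List.ext_getElem
  · simp [hlen]
  · intro k h1 h2
    simp only [List.getElem_map, List.getElem_range]
    rw [pvLabGetInRange _ _ (by positivity) (by exact_mod_cast (by omega : k < (pvLabF w).length))]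
    simp

theorem pvSweepInv (w : List String) (G : PySem.Dict Int (List Int))
    (hG : ∀ u v, pvAdj G u v ↔ (u, v) ∈ pvE w ∨ (v, u) ∈ pvE w)
    (fuel : Nat) (hfuel : ∀ V : PySem.Set Int, 1 + pvMiss G V ≤ fuel) :
    ∀ u : Nat, u ≤ w.length →
      (pvSweepState G fuel u).1.Nodup ∧
      (∀ v, v ∈ (pvSweepState G fuel u).1 ↔ ∃ x : Int, 0 ≤ x ∧ x < (u : Int) ∧ pvConn w x v) ∧
      (pvSweepState G fuel u).2.1 = ((PySem.Set.ofList ((pvLabF w).take u)).length : Int) ∧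
      (pvSweepState G fuel u).2.2
        = ((PySem.Set.ofList ((pvLabF w).take u)).map
            (fun l => ((pvLabF w).count l : Int))).foldl (fun a x => max a x) 0 := by
  have hlen := (pvLabFKer w).1
  have hker := (pvLabFKer w).2
  intro u
  induction u with
  | zero =>
    intro _
    refine ⟨by simp [pvSweepState, PySem.Set.empty], ?_, by simp [pvSweepState, PySem.Set.empty], by simp [pvSweepState, PySem.Set.empty]⟩
    intro v
    simp only [pvSweepState, List.range_zero, List.map_nil, List.foldl_nil]
    constructor
    · intro h; exact absurd h (by simp [PySem.Set.empty])
    · rintro ⟨x, h0, h1, _⟩; omega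
  | succ u ih =>
    intro hu1
    have hu : u < w.length := by omega
    obtain ⟨ihnd, ihmem, ihc, ihr⟩ := ih (by omega)
    have hstep : pvSweepState G fuel (u + 1)
        = (if PySem.Set.contains (pvSweepState G fuel u).1 (u : Int) then pvSweepState G fuel u
           else
             let r1 := pvBfs G fuel (PySem.Set.add (pvSweepState G fuel u).1 (u : Int)) [(u : Int)] 1
             (r1.1, (pvSweepState G fuel u).2.1 + 1, max (pvSweepState G fuel u).2.2 r1.2)) := by
      unfold pvSweepState
      rw [List.range_succ, List.map_append, List.foldl_append]
      rfl
    have hgu : pvGood w.length (u : Int) := ⟨by positivity, by exact_mod_cast hu⟩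
    have hlabu : pvLabGet (pvLabF w) (u : Int) = (pvLabF w)[u]'(by omega) :=
      pvLabGetInRange _ _ (by positivity) (by exact_mod_cast (by omega : u < (pvLabF w).length))
    have htake : (pvLabF w).take (u + 1) = (pvLabF w).take u ++ [(pvLabF w)[u]'(by omega)] := by
      rw [List.take_add_one, List.getElem?_eq_getElem (by omega)]
      rfl
    -- u is already visited iff its label occurs among the first u labels
    have hseenIff : ((u : Int) ∈ (pvSweepState G fuel u).1)
        ↔ pvLabGet (pvLabF w) (u : Int) ∈ (pvLabF w).take u := by
      rw [ihmem]
      constructor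
      · rintro ⟨x, hx0, hx1, hconn⟩
        have hgx : pvGood w.length x := ⟨hx0, by omega⟩
        have hlab := (hker x (u : Int) hgx hgu).2 hconn
        rw [List.mem_take_iff_getElem]
        refine ⟨x.toNat, by omega, ?_⟩
        rw [← hlab, pvLabGetInRange _ _ hx0 (by omega)]
      · intro hmem
        rw [List.mem_take_iff_getElem] at hmem
        obtain ⟨k, hk, hke⟩ := hmem
        refine ⟨(k : Int), by positivity, by omega, ?_⟩
        apply (hker (k : Int) (u : Int) ⟨by positivity, by omega⟩ hgu).1
        rw [pvLabGetInRange _ _ (by positivity) (by omega)]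
        simpa using hke
    by_cases hseen : (u : Int) ∈ (pvSweepState G fuel u).1
    · -- skip branch: everything unchanged
      rw [hstep, if_pos (by rwa [PySem.Set.contains_iff])]
      have hset : PySem.Set.ofList ((pvLabF w).take (u + 1))
          = PySem.Set.ofList ((pvLabF w).take u) := by
        rw [htake, PySem.Set.ofList_append_singleton, PySem.Set.add_of_mem]
        rw [PySem.Set.mem_ofList]
        rw [← hlabu]
        exact hseenIff.1 hseen
      refine ⟨ihnd, ?_, by rw [ihc, hset], by rw [ihr, hset]⟩
      intro v
      rw [ihmem]
      constructor
      · rintro ⟨x, h0, h1, h⟩; exact ⟨x, h0, by omega, h⟩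
      · rintro ⟨x, h0, h1, h⟩
        by_cases hxu : x = (u : Int)
        · subst hxu
          obtain ⟨y, hy0, hy1, hy⟩ := ihmem (u : Int) |>.1 hseen
          exact ⟨y, hy0, hy1, hy.trans _ _ _ h⟩
        · exact ⟨x, h0, by omega, h⟩
    · -- fresh branch: run the BFS
      rw [hstep, if_neg (by rwa [PySem.Set.contains_iff])]
      simp only []
      have hnotmem : ((u : Int)) ∉ (pvSweepState G fuel u).1 := hseen
      have haddV : PySem.Set.add (pvSweepState G fuel u).1 (u : Int)
          = (pvSweepState G fuel u).1 ++ [(u : Int)] := PySem.Set.add_of_not_mem hnotmem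
      have hndV1 : ((pvSweepState G fuel u).1 ++ [(u : Int)]).Nodup := by
        rw [List.nodup_append]
        exact ⟨ihnd, List.nodup_singleton _,
          by intro a ha b hb; simp at hb; subst hb; exact fun h => hnotmem (h ▸ ha)⟩
      have hq1 : ∀ x ∈ [(u : Int)], x ∈ (pvSweepState G fuel u).1 ++ [(u : Int)] := by
        intro x hx; exact List.mem_append_right _ hx
      have hcl1 : ∀ x ∈ (pvSweepState G fuel u).1 ++ [(u : Int)], x ∉ [(u : Int)] →
          ∀ y, pvAdj G x y → y ∈ (pvSweepState G fuel u).1 ++ [(u : Int)] := by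
        intro x hx hxq y hy
        have hxV : x ∈ (pvSweepState G fuel u).1 := by
          rcases List.mem_append.1 hx with h | h
          · exact h
          · exact absurd h hxq
        obtain ⟨z, hz0, hz1, hz⟩ := (ihmem x).1 hxV
        have hconn : pvConn w x y := by
          rcases (hG x y).1 hy with h | h
          · exact Relation.EqvGen.rel _ _ h
          · exact Relation.EqvGen.symm _ _ (Relation.EqvGen.rel _ _ h)
        exact List.mem_append_left _ ((ihmem y).2 ⟨z, hz0, hz1, hz.trans _ _ _ hconn⟩)
      have hfuel1 : ([(u : Int)] : List Int).length
          + pvMiss G ((pvSweepState G fuel u).1 ++ [(u : Int)]) ≤ fuel := by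
        have := hfuel ((pvSweepState G fuel u).1 ++ [(u : Int)])
        simpa using this
      rw [haddV]
      obtain ⟨c1, c2, c3, c4, c5⟩ :=
        pvBfsSpec G fuel ((pvSweepState G fuel u).1 ++ [(u : Int)]) [(u : Int)] 1
          hndV1 hq1 hcl1 hfuel1
      set res := pvBfs G fuel ((pvSweepState G fuel u).1 ++ [(u : Int)]) [(u : Int)] 1 with hres
      -- the membership characterisation of the new visited set
      have hmem' : ∀ v, v ∈ res.1 ↔ ∃ x : Int, 0 ≤ x ∧ x < ((u : Int) + 1) ∧ pvConn w x v := by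
        intro v
        constructor
        · intro hv
          rcases c3 v hv with h | ⟨z, hz, hrt⟩
          · rcases List.mem_append.1 h with h | h
            · obtain ⟨x, h0, h1, hx⟩ := (ihmem v).1 h
              exact ⟨x, h0, by omega, hx⟩
            · simp at h
              subst h
              exact ⟨(u : Int), by positivity, by omega, Relation.EqvGen.refl _⟩
          · simp at hz
            subst hz
            exact ⟨(u : Int), by positivity, by omega,
              (pvRtIffConn w G hG _ _).1 hrt⟩
        · rintro ⟨x, h0, h1, hconn⟩
          by_cases hxu : x = (u : Int)
          · subst hxu
            have hrt := (pvRtIffConn w G hG _ _).2 hconn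
            exact pvClosedRt c4 (c2 _ (List.mem_append_right _ (by simp))) hrt
          · have : x < (u : Int) := by omega
            exact c2 v (List.mem_append_left _ ((ihmem v).2 ⟨x, h0, this, hconn⟩))
      -- the size of the new component is the number of occurrences of u's label
      have hlabmem : pvLabGet (pvLabF w) (u : Int) ∉ (pvLabF w).take u := by
        intro hc
        exact hseen (hseenIff.2 hc)
      have hDlen : (res.2 : Int) = ((pvLabF w).count (pvLabGet (pvLabF w) (u : Int)) : Int) := by
        -- res.2 = 1 + |res.1| - |V ++ [u]| = |res.1| - |V|
        have hVlen : ((pvSweepState G fuel u).1 ++ [(u : Int)]).length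
            = (pvSweepState G fuel u).1.length + 1 := by simp
        -- D = the newly visited vertices
        set D := res.1.filter (fun x => !((pvSweepState G fuel u).1.contains x)) with hD
        have hsub : ∀ x ∈ (pvSweepState G fuel u).1, x ∈ res.1 := by
          intro x hx
          exact c2 x (List.mem_append_left _ hx)
        have hVcount : (res.1.filter (fun x => (pvSweepState G fuel u).1.contains x)).length
            = (pvSweepState G fuel u).1.length := by
          apply pvFilterNodupPerm _ _ (c1.filter _) ihnd
          intro x
          simp only [List.mem_filter, PySem.Set.contains_eq_listContains,
            List.contains_eq_mem, decide_eq_true_eq]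
          constructor
          · rintro ⟨_, h⟩; exact h
          · intro h; exact ⟨hsub x h, h⟩
        have hsplit := pvLenFilterNot (fun x => (pvSweepState G fuel u).1.contains x) res.1
        -- D consists exactly of the vertices with u's label
        have hDmem : ∀ x, x ∈ D ↔ (pvGood w.length x ∧
            pvLabGet (pvLabF w) x = pvLabGet (pvLabF w) (u : Int)) := by
          intro x
          rw [hD, List.mem_filter]
          simp only [PySem.Set.contains_eq_listContains, List.contains_eq_mem,
            Bool.not_eq_true', decide_eq_false_iff_not]
          constructor
          · rintro ⟨hx, hxV⟩
            have hxconn : pvConn w (u : Int) x := by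
              rcases c3 x hx with h | ⟨z, hz, hrt⟩
              · rcases List.mem_append.1 h with h | h
                · exact absurd h hxV
                · simp at h; subst h; exact Relation.EqvGen.refl _
              · simp at hz; subst hz
                exact (pvRtIffConn w G hG _ _).1 hrt
            rcases pvConnGood w _ _ hxconn with heq | ⟨_, hgx⟩
            · rw [← heq]
              exact ⟨hgu, rfl⟩
            · exact ⟨hgx, ((hker (u : Int) x hgu hgx).2 hxconn).symm⟩
          · rintro ⟨hgx, hlab⟩
            have hconn : pvConn w (u : Int) x :=
              (hker (u : Int) x hgu hgx).1 hlab.symm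
            constructor
            · exact pvClosedRt c4 (c2 _ (List.mem_append_right _ (by simp)))
                ((pvRtIffConn w G hG _ _).2 hconn)
            · intro hxV
              obtain ⟨y, hy0, hy1, hy⟩ := (ihmem x).1 hxV
              have : pvConn w y (u : Int) :=
                hy.trans _ _ _ (Relation.EqvGen.symm _ _ hconn)
              exact hseen ((ihmem _).2 ⟨y, hy0, hy1, this⟩)
        -- compare D with the label fiber inside range n
        have hLlen : D.length = (pvLabF w).count (pvLabGet (pvLabF w) (u : Int)) := by
          have hperm : D.length = (((List.range w.length).map (fun (k : Nat) => (k : Int))).filter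
              (fun v => decide (pvLabGet (pvLabF w) v = pvLabGet (pvLabF w) (u : Int)))).length := by
            apply pvFilterNodupPerm _ _ (c1.filter _)
            · exact List.Nodup.filter _ (List.Nodup.map (fun a b h => by simpa using h) List.nodup_range)
            · intro x
              rw [hDmem x]
              simp only [List.mem_filter, List.mem_map, List.mem_range, decide_eq_true_eq]
              constructor
              · rintro ⟨⟨h0, h1⟩, hlab⟩
                refine ⟨⟨x.toNat, ?_, by omega⟩, hlab⟩
                omega
              · rintro ⟨⟨k, hk, rfl⟩, hlab⟩
                exact ⟨⟨by positivity, by exact_mod_cast hk⟩, hlab⟩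
          rw [hperm]
          set lu := pvLabGet (pvLabF w) (u : Int) with hlu
          conv_rhs => rw [pvLabAsMap w]
          rw [List.count_eq_countP, List.countP_map, List.countP_eq_length_filter]
          rw [List.filter_map, List.length_map]
          congr 1
        -- assemble: res.2 = D.length = the count
        have hsplit' : (res.1.filter (fun x => (pvSweepState G fuel u).1.contains x)).length
            + D.length = res.1.length := by
          have := pvLenFilterNot (fun x => (pvSweepState G fuel u).1.contains x) res.1
          rw [hD]
          omega
        rw [c5]
        simp only [List.length_append, List.length_singleton]
        push_cast
        omega
      -- new distinct-label prefix
      have hofl : PySem.Set.ofList ((pvLabF w).take (u + 1))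
          = PySem.Set.ofList ((pvLabF w).take u) ++ [pvLabGet (pvLabF w) (u : Int)] := by
        rw [htake, PySem.Set.ofList_append_singleton, ← hlabu, PySem.Set.add_of_not_mem]
        rw [PySem.Set.mem_ofList]
        exact hlabmem
      refine ⟨c1, ?_, ?_, ?_⟩
      · intro v
        rw [hmem']
        constructor
        · rintro ⟨x, h0, h1, h⟩; exact ⟨x, h0, by push_cast; omega, h⟩
        · rintro ⟨x, h0, h1, h⟩; exact ⟨x, h0, by push_cast at h1 ⊢; omega, h⟩
      · show (pvSweepState G fuel u).2.1 + 1 = _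
        rw [ihc, hofl]
        simp
      · show max (pvSweepState G fuel u).2.2 res.2 = _
        rw [ihr, hofl, hDlen, List.map_append, List.foldl_append]
        rfl

-- ---------- evaluating the two ports ----------

theorem pvGroupA (w : List String) :
    groupStrings w
      = [((PySem.Set.ofList (pvLabF w)).length : Int),
         ((PySem.Set.ofList (pvLabF w)).map (fun l => ((pvLabF w).count l : Int))).foldl
           (fun a x => max a x) 0] := by
  have hlen := (pvLabFKer w).1
  unfold groupStrings
  simp only []
  set G := pvLoop2A (pvLoop1A (pvM w) w).1 (pvLoop1A (pvM w) w).2.values with hGdef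
  set fuel := G.values.flatten.length + 2 with hfueldef
  have hG : ∀ u v, pvAdj G u v ↔ (u, v) ∈ pvE w ∨ (v, u) ∈ pvE w := pvAdjGfin w
  have hfuelV : ∀ V : PySem.Set Int, 1 + pvMiss G V ≤ fuel := by
    intro V
    have := pvMissLe G V
    omega
  have hsw := pvSweepInv w G hG fuel hfuelV w.length (le_refl _)
  have hfold : (PySem.List.pyRange 0 (w.length : Int) 1).foldl
      (fun (st : PySem.Set Int × Int × Int) u =>
        if PySem.Set.contains st.1 u then st
        else
          let r1 := pvBfs G fuel (PySem.Set.add st.1 u) [u] 1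
          (r1.1, st.2.1 + 1, max st.2.2 r1.2))
      (PySem.Set.empty, 0, 0) = pvSweepState G fuel w.length := by
    unfold pvSweepState
    rw [PySem.List.pyRange_zero_natCast]
  rw [hfold]
  have htake : (pvLabF w).take w.length = pvLabF w := by
    rw [← hlen]
    exact List.take_length
  rw [hsw.2.2.1, hsw.2.2.2, htake]

theorem pvGroupB (w : List String) :
    groupStrings_alt w
      = [((PySem.Set.ofList (pvLabF w)).length : Int),
         ((PySem.Set.ofList (pvLabF w)).map (fun l => ((pvLabF w).count l : Int))).foldl
           (fun a x => max a x) 0] := by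
  unfold groupStrings_alt
  simp only []
  rw [← pvM_eq_pvMB, pvLoop1B_eq]
  simp only []
  rw [pvFoldAppendPairs]
  rw [show pvDelPairs (pvM w) w ++ (pvBuckets w).values.flatMap (fun xs => xs.zip (xs.drop 1))
        = pvE w from rfl]
  rw [show (pvE w).foldl
        (fun (lab : List Int) ab =>
          let la := (PySem.List.pyGet? lab ab.1).getD 0
          let lb := (PySem.List.pyGet? lab ab.2).getD 0
          if la ≠ lb then lab.map (fun x => if x = lb then la else x) else lab)
        (PySem.List.pyRange 0 (w.length : Int) 1) = pvLabF w from rfl]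
  rw [← PySem.Dict.counter_eq_foldl]
  have hsz : (PySem.Dict.counter (pvLabF w)).size = (PySem.Set.ofList (pvLabF w)).length := by
    show (PySem.Dict.counter (pvLabF w)).items.length = _
    rw [PySem.Dict.items_counter, List.length_map]
  have hvals : (PySem.Dict.counter (pvLabF w)).values
      = (PySem.Set.ofList (pvLabF w)).map (fun l => ((pvLabF w).count l : Int)) := by
    show (PySem.Dict.counter (pvLabF w)).items.map (fun p => p.2) = _
    rw [PySem.Dict.items_counter, List.map_map]
    rfl
  rw [hsz, hvals]

-- ===== VERDICT (by name: the statement is the Claim_ definition above) =====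
theorem groupStrings_spec : Claim_equal_groupStrings := by
  intro w _hdom _hpre
  show groupStrings w = groupStrings_alt w
  rw [pvGroupA, pvGroupB]
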